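-- pv_equiv track=rewrite | github.com/birc-gsa/bwt-python | src/sa.py | collect_buckets
-- ===== SOURCE A (Python) =====
-- from collections import defaultdict
--
-- def collect_buckets(x: str, col: int) -> dict[int, int]:
--     """Compute the bucket indices for x at column col."""
--     counts: dict[int, int] = defaultdict(lambda: 0)
--     for i in range(len(x)):
--         counts[key(x, i, col)] += 1
--
--     buckets = {}
--     count = 0
--     for a in sorted(counts):
--         buckets[a] = count
--         count += counts[a]
--
--     return buckets
--
-- def key(x: str, suf: int, col: int) -> int:
--     """Compute the key for suffix x[suf:] for column col."""
--     return ord(x[(suf+col) % len(x)])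
-- ===== SOURCE B (Python) =====
-- def collect_buckets(x: str, col: int) -> dict[int, int]:
--     """Compute the bucket indices for x at column col."""
--     n = len(x)
--     keys = [ord(x[(i + col) % n]) for i in range(n)]
--     buckets = {}
--     offset = 0
--     # Selection-style: no counting table and no sort.  Repeatedly extract the
--     # minimum remaining key, record its offset, advance by its multiplicity,
--     # and delete all its occurrences.
--     while keys:
--         m = min(keys)
--         buckets[m] = offset
--         offset += keys.count(m)
--         keys = [k for k in keys if k != m]
--     return buckets
-- ===== Notes on version B (the rewrite author's own statement) =====
-- stated objective: alternative
-- what changed: A builds a count table and cumulates counts over the sorted distinct keys; B uses selection instead: no counting table and no sort, it repeatedly extracts the minimum remaining key, records the running offset, advances it by that key's multiplicity (keys.count), and filters out all its occurrences.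
import Mathlib
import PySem

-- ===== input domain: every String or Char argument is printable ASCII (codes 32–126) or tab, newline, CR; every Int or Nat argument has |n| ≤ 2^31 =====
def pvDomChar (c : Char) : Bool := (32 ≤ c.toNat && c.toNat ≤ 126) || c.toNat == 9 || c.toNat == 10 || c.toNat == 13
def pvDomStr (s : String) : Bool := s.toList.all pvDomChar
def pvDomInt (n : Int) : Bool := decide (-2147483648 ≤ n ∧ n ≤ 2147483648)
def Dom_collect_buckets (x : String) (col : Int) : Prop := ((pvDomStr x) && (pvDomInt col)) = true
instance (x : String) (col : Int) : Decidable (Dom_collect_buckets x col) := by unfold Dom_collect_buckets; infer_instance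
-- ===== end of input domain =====

-- B replaces A's count-table-plus-sorted-cumulation by selection: repeatedly
-- extract the minimum remaining key, record its offset, advance by its
-- multiplicity, and delete its occurrences (objective: alternative, same result).

-- ===== PORT A =====
-- key(x, suf, col) = ord(x[(suf+col) % len(x)]); the IndexError default 0 is
-- unreachable: the loop only calls it with len(x) > 0, and the mod index is then in range.
def pvKey (x : String) (suf col : Int) : Int :=
  match PySem.Str.pyGet? x (PySem.Int.mod (suf + col) (PySem.Str.len x)) with
  | some c => (c.toNat : Int)
  | none => 0

-- counts = defaultdict(0); for i in range(len(x)): counts[key(x,i,col)] += 1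
def pvCountsA (x : String) (col : Int) : PySem.Dict Int Int :=
  (PySem.List.pyRange 0 (PySem.Str.len x) 1).foldl
    (fun d i => d.modify (pvKey x i col) 0 (· + 1)) PySem.Dict.empty

def collect_buckets (x : String) (col : Int) : List (Int × Int) :=
  let counts := pvCountsA x col
  ((PySem.List.sorted counts.keys (fun a => a) false).foldl
    (fun (st : List (Int × Int) × Int) a => (st.1 ++ [(a, st.2)], st.2 + counts.getD a 0))
    ([], 0)).1

-- ===== PORT B =====
-- termination helper for the while loop: filtering out the minimum shortens the list
lemma pvSelect_dec (ks : List Int) (m : Int)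
    (h : PySem.List.min? ks (fun y => y) = some m) :
    (ks.filter (fun k => decide (k ≠ m))).length < ks.length := by
  have hm : m ∈ ks := PySem.List.min?_mem h
  rcases (List.length_filter_le (fun k => decide (k ≠ m)) ks).lt_or_eq with h1 | h1
  · exact h1
  · exact absurd (List.length_filter_eq_length_iff.mp h1 m hm) (by simp)

-- while keys: m = min(keys); buckets[m] = offset; offset += keys.count(m);
--             keys = [k for k in keys if k != m]
def pvSelect (ks : List Int) (off : Int) (acc : List (Int × Int)) : List (Int × Int) :=
  match h : PySem.List.min? ks (fun y => y) with
  | none => acc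
  | some m =>
      pvSelect (ks.filter (fun k => decide (k ≠ m)))
        (off + (PySem.List.count ks m : Int)) (acc ++ [(m, off)])
termination_by ks.length
decreasing_by rw [List.unattach_filter (g := fun k => decide (k ≠ m)) (hf := fun x h => rfl), List.unattach_attach]; exact pvSelect_dec ks m h

def collect_buckets_alt (x : String) (col : Int) : List (Int × Int) :=
  let keys := (PySem.List.pyRange 0 (PySem.Str.len x) 1).map (fun i => pvKey x i col)
  pvSelect keys 0 []

-- ===== PRECONDITION & SPEC =====
def Spec_collect_buckets (x : String) (col : Int) (out : List (Int × Int)) : Prop := out = collect_buckets_alt x col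
instance (x : String) (col : Int) (out : List (Int × Int)) : Decidable (Spec_collect_buckets x col out) := by unfold Spec_collect_buckets; infer_instance

-- ===== CLAIM =====
def Claim_equal_collect_buckets : Prop := ∀ (x : String) (col : Int), Dom_collect_buckets x col → Spec_collect_buckets x col (collect_buckets x col)

-- ===== LEMMAS AND PROOFS =====

-- the multiset of keys counted by both programs
def pvKs (x : String) (col : Int) : List Int :=
  (PySem.List.pyRange 0 (PySem.Str.len x) 1).map (fun i => pvKey x i col)

lemma pvCountsA_eq (x : String) (col : Int) :
    pvCountsA x col = PySem.Dict.counter (pvKs x col) := by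
  rw [PySem.Dict.counter_eq_foldl, pvKs, List.foldl_map, pvCountsA]

-- A's cumulation over any strictly increasing enumeration of ks's members,
-- with any count function agreeing with ks's multiplicities, IS the selection loop.
lemma fold_eq_select (cnt : Int → Int) :
    ∀ (S : List Int) (ks : List Int) (off : Int) (acc : List (Int × Int)),
      S.Pairwise (· < ·) →
      (∀ k, k ∈ S ↔ k ∈ ks) →
      (∀ k ∈ S, cnt k = (ks.count k : Int)) →
      (S.foldl (fun (st : List (Int × Int) × Int) a => (st.1 ++ [(a, st.2)], st.2 + cnt a))
        (acc, off)).1 = pvSelect ks off acc := by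
  intro S
  induction S with
  | nil =>
    intro ks off acc _ hmem _
    have hks : ks = [] := by
      cases ks with
      | nil => rfl
      | cons a t => exact absurd ((hmem a).mpr (by simp)) (by simp)
    subst hks
    rw [pvSelect]
    simp [PySem.List.min?]
  | cons a S' ih =>
    intro ks off acc hpw hmem hcnt
    have haks : a ∈ ks := (hmem a).mp (by simp)
    -- min? ks = some a
    have hm : PySem.List.min? ks (fun y => y) = some a := by
      cases h : PySem.List.min? ks (fun y => y) with
      | none =>
        exact absurd ((PySem.List.min?_eq_none_iff ks (fun y => y)).mp h)
          (by rintro rfl; simp at haks)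
      | some m =>
        have hmmem : m ∈ ks := PySem.List.min?_mem h
        have hmin : m ≤ a := PySem.List.min?_isMin h a haks
        rcases List.mem_cons.mp ((hmem m).mpr hmmem) with h2 | h2
        · exact congrArg some h2
        · have : a < m := (List.pairwise_cons.mp hpw).1 m h2
          omega
    rw [pvSelect]
    split
    · simp_all
    · rename_i m' hm'
      have hm'm : m' = a := by rw [hm] at hm'; exact ((Option.some.injEq _ _).mp hm').symm
      rw [hm'm]
      rw [List.foldl_cons]
      have hca : cnt a = (ks.count a : Int) := hcnt a (by simp)
      rw [hca]
      apply ih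
      · exact (List.pairwise_cons.mp hpw).2
      · intro k
        constructor
        · intro hk
          have hkne : k ≠ a := by
            have : a < k := (List.pairwise_cons.mp hpw).1 k hk
            omega
          simp only [List.mem_filter, decide_eq_true_eq]
          exact ⟨(hmem k).mp (by simp [hk]), by simpa using hkne⟩
        · intro hk
          simp only [List.mem_filter, decide_eq_true_eq, ne_eq] at hk
          rcases List.mem_cons.mp ((hmem k).mpr hk.1) with h | h
          · exact absurd h hk.2
          · exact h
      · intro k hk
        have hkne : k ≠ a := by
          have : a < k := (List.pairwise_cons.mp hpw).1 k hk
          omega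
        rw [hcnt k (by simp [hk])]
        congr 1
        rw [List.count_filter]
        simp [hkne]

-- ===== VERDICT =====
theorem collect_buckets_spec : Claim_equal_collect_buckets := by
  intro x col _
  show collect_buckets x col = collect_buckets_alt x col
  rw [collect_buckets, collect_buckets_alt, pvCountsA_eq]
  show _ = pvSelect (pvKs x col) 0 []
  apply fold_eq_select
  · rw [PySem.Dict.keys_counter]
    exact PySem.List.sorted_ofList_pairwise_lt _
  · intro k
    rw [PySem.List.mem_sorted, PySem.Dict.keys_counter, PySem.Set.mem_ofList]
  · intro k _
    exact PySem.Dict.getD_counter _ _
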